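-- pv_equiv track=rewrite | github.com/Rakshith176/kisan_mitra | backend/app/services/karnataka_market_tool.py | _get_commodity_category
-- ===== SOURCE A (Python) =====
-- def _get_commodity_category(commodity: str) -> str:
--     """Get commodity category for analysis"""
--     commodity_lower = commodity.lower()
--
--     if any(crop in commodity_lower for crop in ["wheat", "rice", "jowar", "bajra", "maize"]):
--         return "Cereals"
--     elif any(crop in commodity_lower for crop in ["onion", "potato", "tomato", "cauliflower"]):
--         return "Vegetables"
--     elif any(crop in commodity_lower for crop in ["apple", "banana", "mango", "orange"]):
--         return "Fruits"
--     elif any(crop in commodity_lower for crop in ["pulse", "dal", "gram"]):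
--         return "Pulses"
--     elif any(crop in commodity_lower for crop in ["groundnut", "sesame", "mustard"]):
--         return "Oil Seeds"
--     else:
--         return "Others"
-- ===== SOURCE B (Python) =====
-- # Flat keyword -> category map in *increasing* priority order; a single
-- # last-write-wins pass replaces A's five short-circuiting if/elif branches.
-- _CATEGORY_BY_KEYWORD = {
--     "groundnut": "Oil Seeds", "sesame": "Oil Seeds", "mustard": "Oil Seeds",
--     "pulse": "Pulses", "dal": "Pulses", "gram": "Pulses",
--     "apple": "Fruits", "banana": "Fruits", "mango": "Fruits", "orange": "Fruits",
--     "onion": "Vegetables", "potato": "Vegetables", "tomato": "Vegetables",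
--     "cauliflower": "Vegetables",
--     "wheat": "Cereals", "rice": "Cereals", "jowar": "Cereals", "bajra": "Cereals",
--     "maize": "Cereals",
-- }
--
-- def _get_commodity_category(commodity: str) -> str:
--     """Get commodity category for analysis"""
--     commodity_lower = commodity.lower()
--     category = "Others"
--     for keyword, cat in _CATEGORY_BY_KEYWORD.items():
--         if keyword in commodity_lower:
--             category = cat
--     return category
-- ===== Notes on version B (the rewrite author's own statement) =====
-- stated objective: alternative
-- what changed: Replaces the five short-circuiting if/elif keyword-group branches with a flat keyword-to-category map in increasing priority order scanned in one last-write-wins pass (every keyword tested, later i.e. higher-priority matches overwrite earlier ones, 'Others' is the initial accumulator).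
import Mathlib
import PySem

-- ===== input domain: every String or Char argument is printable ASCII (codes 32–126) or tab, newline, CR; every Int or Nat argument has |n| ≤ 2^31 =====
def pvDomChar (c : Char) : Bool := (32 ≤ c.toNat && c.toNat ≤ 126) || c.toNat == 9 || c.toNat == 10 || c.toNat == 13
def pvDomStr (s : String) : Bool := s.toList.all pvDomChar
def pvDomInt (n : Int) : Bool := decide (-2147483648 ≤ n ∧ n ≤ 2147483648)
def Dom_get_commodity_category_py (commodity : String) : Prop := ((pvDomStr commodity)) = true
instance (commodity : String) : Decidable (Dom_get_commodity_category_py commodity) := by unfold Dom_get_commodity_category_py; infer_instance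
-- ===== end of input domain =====

-- B replaces A's five short-circuiting if/elif group branches by one flat keyword→category
-- map in increasing-priority order scanned with a single last-write-wins pass (objective: alternative).

-- ===== PORT A =====
def get_commodity_category_py (commodity : String) : String :=
  let commodity_lower := PySem.Str.lower commodity
  if ["wheat", "rice", "jowar", "bajra", "maize"].any (fun crop => PySem.Str.isIn crop commodity_lower) then
    "Cereals"
  else if ["onion", "potato", "tomato", "cauliflower"].any (fun crop => PySem.Str.isIn crop commodity_lower) then
    "Vegetables"
  else if ["apple", "banana", "mango", "orange"].any (fun crop => PySem.Str.isIn crop commodity_lower) then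
    "Fruits"
  else if ["pulse", "dal", "gram"].any (fun crop => PySem.Str.isIn crop commodity_lower) then
    "Pulses"
  else if ["groundnut", "sesame", "mustard"].any (fun crop => PySem.Str.isIn crop commodity_lower) then
    "Oil Seeds"
  else
    "Others"

-- ===== PORT B =====
-- the literal dict of Source B as an association list (insertion order)
def categoryByKeyword : List (String × String) :=
  [("groundnut", "Oil Seeds"), ("sesame", "Oil Seeds"), ("mustard", "Oil Seeds"),
   ("pulse", "Pulses"), ("dal", "Pulses"), ("gram", "Pulses"),
   ("apple", "Fruits"), ("banana", "Fruits"), ("mango", "Fruits"), ("orange", "Fruits"),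
   ("onion", "Vegetables"), ("potato", "Vegetables"), ("tomato", "Vegetables"),
   ("cauliflower", "Vegetables"),
   ("wheat", "Cereals"), ("rice", "Cereals"), ("jowar", "Cereals"), ("bajra", "Cereals"),
   ("maize", "Cereals")]

def get_commodity_category_py_alt (commodity : String) : String :=
  let commodity_lower := PySem.Str.lower commodity
  categoryByKeyword.foldl
    (fun category p => if PySem.Str.isIn p.1 commodity_lower then p.2 else category)
    "Others"

-- ===== PRECONDITION & SPEC =====
def Spec_get_commodity_category_py (commodity : String) (out : String) : Prop := out = get_commodity_category_py_alt commodity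
instance (commodity : String) (out : String) : Decidable (Spec_get_commodity_category_py commodity out) := by unfold Spec_get_commodity_category_py; infer_instance

-- ===== CLAIM (what is proved, stated in full; the proofs are below) =====
def Claim_equal_get_commodity_category_py : Prop := ∀ (commodity : String), Dom_get_commodity_category_py commodity → Spec_get_commodity_category_py commodity (get_commodity_category_py commodity)

-- ===== LEMMAS AND PROOFS =====

theorem ite_write_or {α : Type} (a b : Bool) (x y : α) :
    (if b = true then x else if a = true then x else y) = if (a || b) = true then x else y := by
  cases a <;> cases b <;> simp

-- Folding a segment of keywords that all map to the same category c is "if any matches then c else acc".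
theorem foldl_const_category (s c : String) (kws : List String) (acc : String) :
    List.foldl (fun category p => if PySem.Str.isIn p.1 s then p.2 else category) acc
      (kws.map (fun kw => (kw, c)))
    = if kws.any (fun kw => PySem.Str.isIn kw s) then c else acc := by
  induction kws generalizing acc with
  | nil => simp
  | cons k t ih =>
      simp only [List.map_cons, List.foldl_cons, List.any_cons, ih]
      exact ite_write_or _ _ _ _

theorem categoryByKeyword_eq_segments :
    categoryByKeyword =
      (["groundnut", "sesame", "mustard"].map (fun kw => (kw, "Oil Seeds"))) ++
      (["pulse", "dal", "gram"].map (fun kw => (kw, "Pulses"))) ++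
      (["apple", "banana", "mango", "orange"].map (fun kw => (kw, "Fruits"))) ++
      (["onion", "potato", "tomato", "cauliflower"].map (fun kw => (kw, "Vegetables"))) ++
      (["wheat", "rice", "jowar", "bajra", "maize"].map (fun kw => (kw, "Cereals"))) := by
  rfl

-- ===== VERDICT (by name: the statement is the Claim_ definition above) =====
theorem get_commodity_category_py_spec : Claim_equal_get_commodity_category_py := by
  intro commodity _
  unfold Spec_get_commodity_category_py get_commodity_category_py get_commodity_category_py_alt
  rw [categoryByKeyword_eq_segments]
  simp only [List.foldl_append, foldl_const_category]
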